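-- pv_equiv track=rewrite | github.com/GLA-Python/surprise-test-vivek3333 | surprise_test.py | expanding
-- ===== SOURCE A (Python) =====
-- def expanding(lst):
--     lst1 = []
--     try:
--         for i in range(len(lst)):
--             out = (lst[i+1])-lst[i]
--             lst1.append(abs(out))
--     except:
--         lst1.append(lst[-1])
--     if sorted(lst1)==lst1:
--         return True
--     else:
--         return False
-- ===== SOURCE B (Python) =====
-- def expanding(lst):
--     prev = None
--     for x, y in zip(lst, lst[1:]):
--         d = abs(y - x)
--         if prev is not None and d < prev:
--             return False
--         prev = d
--     return True
-- ===== Notes on version B (the rewrite author's own statement) =====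
-- stated objective: faster
-- what changed: B does one linear pass over adjacent pairs with early exit instead of building the full abs-difference list (plus A's stray last element) and sorting it for comparison.
-- intended difference: On lists of length >= 2 whose absolute consecutive differences are non-decreasing but whose last element is smaller than the last difference, A returns False because its except clause also appends the raw last element before the sortedness check, while B returns True, the intended answer for non-decreasing differences. — e.g. on expanding([5, 3, 1]): A returns false, B returns true
import Mathlib
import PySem

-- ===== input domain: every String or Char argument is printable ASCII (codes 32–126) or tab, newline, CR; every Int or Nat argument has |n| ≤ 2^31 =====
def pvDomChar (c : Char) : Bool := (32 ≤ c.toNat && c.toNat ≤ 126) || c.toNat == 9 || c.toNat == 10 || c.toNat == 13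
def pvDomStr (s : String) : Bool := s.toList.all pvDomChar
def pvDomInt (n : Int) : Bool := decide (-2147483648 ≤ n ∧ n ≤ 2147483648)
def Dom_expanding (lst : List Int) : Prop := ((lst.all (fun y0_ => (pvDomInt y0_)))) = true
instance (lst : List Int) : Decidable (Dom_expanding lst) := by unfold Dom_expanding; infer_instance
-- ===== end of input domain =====

-- B is a single linear pass over adjacent pairs with early exit (no sort, no built list);
-- A's except-clause also appends the raw last element, which makes A wrong on the D_ inputs below.

-- ===== PORT A =====
-- the try/for loop: 'remaining' counts the indices of range(len(lst)) still to visit; lst[i+1]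
-- raises IndexError at i = len-1, whereupon the except block appends lst[-1] and the loop stops
def expandingLoop (lst : List Int) (remaining : Nat) (i : Nat) (lst1 : List Int) : List Int :=
  match remaining with
  | 0 => lst1
  | r + 1 =>
    match PySem.List.pyGet? lst ((i : Int) + 1), PySem.List.pyGet? lst (i : Int) with
    | some b, some a => expandingLoop lst r (i + 1) (lst1 ++ [|b - a|])
    | _, _ => lst1 ++ [(PySem.List.pyGet? lst (-1)).getD 0]  -- except: lst1.append(lst[-1]) (lst nonempty here)

def expanding (lst : List Int) : Bool :=
  let lst1 := expandingLoop lst lst.length 0 []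
  if PySem.List.sorted lst1 (fun x => x) false = lst1 then true else false

-- ===== PORT B =====
-- for x, y in zip(lst, lst[1:]): keep the previous |y-x| and bail out on a decrease
def altLoop (prev : Option Int) : List (Int × Int) → Bool
  | [] => true
  | (x, y) :: rest =>
    let d := |y - x|
    match prev with
    | some p => if d < p then false else altLoop (some d) rest
    | none => altLoop (some d) rest

def expanding_alt (lst : List Int) : Bool :=
  altLoop none (lst.zip (PySem.List.slice lst (some 1) none))

-- ===== PRECONDITION & SPEC =====
-- the list of absolute consecutive differences (used only to state D_)
def absDiffs : List Int → List Int
  | x :: y :: r => |y - x| :: absDiffs (y :: r)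
  | _ => []

-- On lists of length ≥ 2 whose absolute consecutive differences are non-decreasing but whose last
-- element is smaller than the last difference, A returns False — its except clause appends the raw
-- last element to the difference list before the sortedness check — while B returns True, the
-- intended answer for "are the differences non-decreasing".
def D_expanding (lst : List Int) : Prop :=
  2 ≤ lst.length ∧ (absDiffs lst).Pairwise (· ≤ ·) ∧ lst.getLastD 0 < (absDiffs lst).getLastD 0
instance (lst : List Int) : Decidable (D_expanding lst) := by unfold D_expanding; infer_instance

def Spec_expanding (lst : List Int) (out : Bool) : Prop := ¬ D_expanding lst → out = expanding_alt lst
instance (lst : List Int) (out : Bool) : Decidable (Spec_expanding lst out) := by unfold Spec_expanding; infer_instance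

def pvDiffWitness_expanding : List Int := [5, 3, 1]
def pvDiffWitnessOut_expanding : Bool × Bool := (false, true)

-- ===== CLAIM (what is proved, stated in full; the proofs are below) =====
def Claim_unchanged_expanding : Prop := ∀ (lst : List Int), Dom_expanding lst → Spec_expanding lst (expanding lst)
def Claim_changed_expanding : Prop := Dom_expanding (pvDiffWitness_expanding) ∧ D_expanding (pvDiffWitness_expanding) ∧ expanding (pvDiffWitness_expanding) = pvDiffWitnessOut_expanding.1 ∧ expanding_alt (pvDiffWitness_expanding) = pvDiffWitnessOut_expanding.2 ∧ pvDiffWitnessOut_expanding.1 ≠ pvDiffWitnessOut_expanding.2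
def Claim_exact_expanding : Prop := ∀ (lst : List Int), Dom_expanding lst → D_expanding lst → expanding lst ≠ expanding_alt lst

-- ===== LEMMAS AND PROOFS =====

-- A's loop builds absDiffs (drop i) followed by the last element
lemma absDiffs_drop (lst : List Int) (i : Nat) (h : i + 1 < lst.length) :
    absDiffs (List.drop i lst) = |lst[i + 1] - lst[i]| :: absDiffs (List.drop (i + 1) lst) := by
  have h0 : i < lst.length := by omega
  rw [List.drop_eq_getElem_cons h0, List.drop_eq_getElem_cons h]
  rfl

lemma expandingLoop_spec (lst : List Int) : ∀ r i acc, i < lst.length → r = lst.length - i →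
    expandingLoop lst r i acc = acc ++ absDiffs (List.drop i lst) ++ [lst.getLastD 0] := by
  intro r
  induction r with
  | zero => intro i acc hi hr; omega
  | succ n ih =>
    intro i acc hi hr
    have hcast1 : ((i : Int) + 1) = ((i + 1 : Nat) : Int) := by push_cast; ring
    by_cases h1 : i + 1 < lst.length
    · have hb : PySem.List.pyGet? lst ((i : Int) + 1) = some lst[i + 1] := by
        rw [hcast1, PySem.List.pyGet?_natCast, List.getElem?_eq_getElem h1]
      have ha : PySem.List.pyGet? lst ((i : Int)) = some lst[i] := by
        rw [PySem.List.pyGet?_natCast, List.getElem?_eq_getElem hi]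
      rw [expandingLoop, hb, ha]
      dsimp only
      rw [ih (i + 1) _ h1 (by omega), absDiffs_drop lst i h1]
      simp
    · have hb : PySem.List.pyGet? lst ((i : Int) + 1) = none := by
        rw [hcast1, PySem.List.pyGet?_natCast]
        exact List.getElem?_eq_none (by omega)
      rw [expandingLoop, hb]
      have hne : lst ≠ [] := by intro h; simp [h] at hi
      have hdi : absDiffs (List.drop i lst) = [] := by
        have hl : (List.drop i lst).length = 1 := by simp; omega
        obtain ⟨z, hz⟩ := List.length_eq_one_iff.mp hl
        rw [hz]; rfl
      rw [PySem.List.pyGet?_neg_one]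
      simp [hdi, List.getLastD_eq_getLast?]

lemma lst1_eq (lst : List Int) (hne : lst ≠ []) :
    expandingLoop lst lst.length 0 [] = absDiffs lst ++ [lst.getLastD 0] := by
  have := expandingLoop_spec lst lst.length 0 [] (by cases lst <;> simp_all) (by omega)
  simpa using this

-- sorted(l)==l is exactly non-decreasingness
lemma sorted_eq_iff (l : List Int) :
    (PySem.List.sorted l (fun x => x) false = l) ↔ l.Pairwise (· ≤ ·) := by
  constructor
  · intro h
    have := PySem.List.sorted_pairwise (xs := l) (key := fun x => x)
    rwa [h] at this
  · intro h
    exact PySem.List.sorted_eq_self_of_pairwise l (fun x => x) h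

lemma expanding_eq_decide (lst : List Int) :
    expanding lst = decide ((expandingLoop lst lst.length 0 []).Pairwise (· ≤ ·)) := by
  unfold expanding
  by_cases h : (expandingLoop lst lst.length 0 []).Pairwise (· ≤ ·)
  · simp [(sorted_eq_iff _).mpr h, h]
  · simp [h]
    intro hc
    exact h ((sorted_eq_iff _).mp hc)

-- B's loop decides pairwise non-decreasingness of the difference list
lemma altLoop_some_iff : ∀ (ps : List (Int × Int)) (p : Int),
    altLoop (some p) ps = true ↔ (p :: ps.map (fun q => |q.2 - q.1|)).Pairwise (· ≤ ·) := by
  intro ps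
  induction ps with
  | nil => intro p; simp [altLoop]
  | cons q rest ih =>
    intro p
    obtain ⟨x, y⟩ := q
    simp only [altLoop, List.map_cons]
    by_cases hlt : |y - x| < p
    · simp only [if_pos hlt]
      constructor
      · intro h; exact absurd h (by simp)
      · intro h
        have := (List.pairwise_cons.mp h).1 |y - x| (by simp)
        omega
    · simp only [if_neg hlt, ih]
      constructor
      · intro h
        obtain ⟨hd, ht⟩ := List.pairwise_cons.mp h
        rw [List.pairwise_cons]
        refine ⟨?_, h⟩
        intro a ha
        rcases List.mem_cons.mp ha with rfl | ha
        · omega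
        · have := hd a ha
          omega
      · intro h
        exact (List.pairwise_cons.mp h).2

lemma altLoop_none_iff (ps : List (Int × Int)) :
    altLoop none ps = true ↔ (ps.map (fun q => |q.2 - q.1|)).Pairwise (· ≤ ·) := by
  cases ps with
  | nil => simp [altLoop]
  | cons q rest =>
    obtain ⟨x, y⟩ := q
    simp only [altLoop, List.map_cons]
    exact altLoop_some_iff rest |y - x|

lemma absDiffs_eq_zip_map (lst : List Int) :
    absDiffs lst = (lst.zip lst.tail).map (fun q => |q.2 - q.1|) := by
  induction lst with
  | nil => rfl
  | cons x t ih =>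
    cases t with
    | nil => rfl
    | cons y r => simp [absDiffs, ih]

lemma expanding_alt_iff (lst : List Int) :
    expanding_alt lst = true ↔ (absDiffs lst).Pairwise (· ≤ ·) := by
  unfold expanding_alt
  rw [PySem.List.slice_from_one, altLoop_none_iff, absDiffs_eq_zip_map]

-- every element of a non-decreasing nonempty list is ≤ its last element
lemma le_getLastD_of_pairwise : ∀ (l : List Int), l.Pairwise (· ≤ ·) →
    ∀ d ∈ l, d ≤ l.getLastD 0 := by
  intro l
  induction l with
  | nil => intro _ d hd; simp at hd
  | cons x t ih =>
    intro hp d hd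
    rw [List.pairwise_cons] at hp
    cases t with
    | nil => simp at hd; simp [hd]
    | cons y r =>
      have hlast : ((x :: y :: r).getLastD 0) = ((y :: r).getLastD 0) := by simp
      rw [hlast]
      rcases List.mem_cons.mp hd with rfl | hd
      · have hy := ih hp.2 y (by simp)
        have := hp.1 y (by simp)
        omega
      · exact ih hp.2 d hd

lemma getLastD_mem (l : List Int) (h : l ≠ []) : l.getLastD 0 ∈ l := by
  rw [List.getLastD_eq_getLast?, List.getLast?_eq_some_getLast h]
  exact List.getLast_mem h

lemma absDiffs_ne_nil (lst : List Int) (h : 2 ≤ lst.length) : absDiffs lst ≠ [] := by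
  match lst with
  | x :: y :: r => simp [absDiffs]
  | [] | [x] => simp at h

-- the full correspondence: for nonempty lst, A checks absDiffs ++ [last]
lemma expanding_iff (lst : List Int) (hne : lst ≠ []) :
    expanding lst = true ↔
      ((absDiffs lst).Pairwise (· ≤ ·) ∧ ∀ d ∈ absDiffs lst, d ≤ lst.getLastD 0) := by
  rw [expanding_eq_decide, lst1_eq lst hne]
  simp [List.pairwise_append]

-- ===== VERDICT (by name: the statement is the Claim_ definition above) =====
theorem expanding_spec : Claim_unchanged_expanding := by
  intro lst _ hD
  unfold D_expanding at hD
  rcases eq_or_ne lst [] with rfl | hne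
  · decide
  · by_cases h2 : 2 ≤ lst.length
    · by_cases hp : (absDiffs lst).Pairwise (· ≤ ·)
      · have hge : (absDiffs lst).getLastD 0 ≤ lst.getLastD 0 := by
          by_contra hlt
          exact hD ⟨h2, hp, by omega⟩
        have hA : expanding lst = true := by
          rw [expanding_iff lst hne]
          refine ⟨hp, fun d hd => ?_⟩
          have := le_getLastD_of_pairwise _ hp d hd
          omega
        have hB : expanding_alt lst = true := (expanding_alt_iff lst).mpr hp
        rw [hA, hB]
      · have hA : expanding lst = false := by
          rw [← Bool.not_eq_true, expanding_iff lst hne]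
          intro h; exact hp h.1
        have hB : expanding_alt lst = false := by
          rw [← Bool.not_eq_true, expanding_alt_iff]
          exact hp
        rw [hA, hB]
    · -- singleton: absDiffs = [], both sides true
      have hl1 : lst.length = 1 := by
        rcases lst with _ | ⟨a, _ | ⟨b, t⟩⟩ <;> simp_all
      obtain ⟨x, rfl⟩ := List.length_eq_one_iff.mp hl1
      have hA : expanding [x] = true := by
        rw [expanding_iff [x] (by simp)]
        exact ⟨by simp [absDiffs], by simp [absDiffs]⟩
      have hB : expanding_alt [x] = true := (expanding_alt_iff [x]).mpr (by simp [absDiffs])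
      rw [hA, hB]

theorem expanding_changed : Claim_changed_expanding := by
  unfold Claim_changed_expanding; decide

theorem expanding_tight : Claim_exact_expanding := by
  intro lst _ hD
  obtain ⟨h2, hp, hlt⟩ := hD
  have hne : lst ≠ [] := by intro h; simp [h] at h2
  have hB : expanding_alt lst = true := (expanding_alt_iff lst).mpr hp
  have hA : expanding lst = false := by
    rw [← Bool.not_eq_true, expanding_iff lst hne]
    rintro ⟨-, hall⟩
    have hmem := getLastD_mem (absDiffs lst) (absDiffs_ne_nil lst h2)
    have := hall _ hmem
    omega
  rw [hA, hB]; simp
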